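-- pv_equiv track=rewrite | github.com/sahana/eden | modules/eden/org.py | returnUniqueCode
-- ===== SOURCE A (Python) =====
-- def returnUniqueCode(code, wildcard_posn=[], code_list=[]):
--     """
--     """
--     # Select the replacement letters with numbers first and then
--     # followed by the letters in least commonly used order
--     replacement_char = "1234567890ZQJXKVBWPYGUMCFLDHSIRNOATE"
--     rep_posn = [0] * len(wildcard_posn)
--     finished = False
--     while (not finished):
--         # Find the next code to try
--         temp_code = ""
--         r = 0
--         for posn in range(len(code)):
--             if posn in wildcard_posn:
--                 temp_code += replacement_char[rep_posn[r]]
--                 r += 1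
--             else:
--                 temp_code += code[posn]
--         if temp_code not in code_list:
--             return temp_code
--         # set up the next rep_posn
--         p = 0
--         while (p < len(wildcard_posn)):
--             if rep_posn[p] == 35: # the maximum number of replacement characters
--                 rep_posn[p] = 0
--                 p += 1
--             else:
--                 rep_posn[p] = rep_posn[p] + 1
--                 break
--         # if no new permutation of replacement characters has been found
--         if p == len(wildcard_posn):
--             return None
-- ===== SOURCE B (Python) =====
-- def returnUniqueCode(code, wildcard_posn=[], code_list=[]):
--     # Precompute the fixed text segments between wildcard slots once; then each
--     # trial index i fills the slots with its base-36 digits (first slot fastest).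
--     replacement_char = "1234567890ZQJXKVBWPYGUMCFLDHSIRNOATE"
--     used = set(code_list)
--     wild = set(wildcard_posn)
--     segs = []
--     cur = []
--     for posn, ch in enumerate(code):
--         if posn in wild:
--             segs.append("".join(cur))
--             cur = []
--         else:
--             cur.append(ch)
--     last = "".join(cur)
--     for i in range(36 ** len(wildcard_posn)):
--         temp_code = "".join(
--             seg + replacement_char[i // 36 ** r % 36]
--             for r, seg in enumerate(segs)
--         ) + last
--         if temp_code not in used:
--             return temp_code
--     return None
-- ===== Notes on version B (the rewrite author's own statement) =====
-- stated objective: faster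
-- what changed: B precomputes the fixed text segments between wildcard slots in one pass and, instead of A's mutable rep_posn odometer with carry propagation, fills the slots for trial i by reading i's base-36 digits off arithmetically and joining segments with digits; a set of code_list replaces the per-trial linear list scan.
import Mathlib
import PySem

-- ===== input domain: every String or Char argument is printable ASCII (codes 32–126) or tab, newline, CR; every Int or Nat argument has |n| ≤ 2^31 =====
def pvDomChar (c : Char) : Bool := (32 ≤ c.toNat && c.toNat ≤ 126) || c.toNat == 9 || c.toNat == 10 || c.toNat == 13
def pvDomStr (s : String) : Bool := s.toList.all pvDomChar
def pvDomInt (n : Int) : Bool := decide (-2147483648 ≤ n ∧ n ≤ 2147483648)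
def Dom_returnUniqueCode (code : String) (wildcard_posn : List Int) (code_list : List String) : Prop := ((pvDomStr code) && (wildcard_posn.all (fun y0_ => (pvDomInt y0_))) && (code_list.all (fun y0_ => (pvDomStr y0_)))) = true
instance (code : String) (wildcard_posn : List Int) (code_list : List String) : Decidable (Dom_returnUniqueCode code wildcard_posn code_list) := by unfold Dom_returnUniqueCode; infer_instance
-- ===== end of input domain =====

-- B precomputes the fixed segments between wildcard slots once and fills the slots
-- from the trial index's base-36 digits, replacing A's per-trial character walk and
-- mutable rep_posn odometer (alternative decomposition, same return value).

-- ===== PORT A =====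
def pvReplacement : List Char := "1234567890ZQJXKVBWPYGUMCFLDHSIRNOATE".toList

-- the for-posn loop of A: builds temp_code, threading r
def pvBuildA (codeL : List Char) (wp : List Int) (rep : List Nat) : List Char × Nat :=
  (List.range codeL.length).foldl (fun (acc : List Char × Nat) (posn : Nat) =>
    if ((posn : Int) ∈ wp) then
      (acc.1 ++ [pvReplacement.getD (rep.getD acc.2 0) ' '], acc.2 + 1)
    else
      (acc.1 ++ [codeL.getD posn ' '], acc.2)) ([], 0)

-- A's inner while loop advancing rep_posn: none when p reached len(wildcard_posn)
def pvOdo : List Nat → Option (List Nat)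
  | [] => none
  | d :: rest => if d = 35 then (pvOdo rest).map (fun t => 0 :: t) else some ((d + 1) :: rest)

-- A's outer while loop; fuel is only a totality guard (A performs at most 36^w trials)
def pvLoopA (codeL : List Char) (wp : List Int) (cl : List String) (rep : List Nat) : Nat → Option String
  | 0 => none
  | fuel + 1 =>
    let temp := String.mk (pvBuildA codeL wp rep).1
    if temp ∉ cl then some temp
    else match pvOdo rep with
      | none => none
      | some rep' => pvLoopA codeL wp cl rep' fuel

def returnUniqueCode (code : String) (wildcard_posn : List Int) (code_list : List String) : Option String :=
  pvLoopA code.toList wildcard_posn code_list (List.replicate wildcard_posn.length 0) (36 ^ wildcard_posn.length)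

-- ===== PORT B =====
-- B's one-pass segment scan: `for posn, ch in enumerate(code)` splitting at wildcards
def pvSegs (codeL : List Char) (wild : List Int) : List (List Char) × List Char :=
  codeL.zipIdx.foldl (fun (st : List (List Char) × List Char) (p : Char × Nat) =>
    if ((p.2 : Int) ∈ wild) then (st.1 ++ [st.2], [])
    else (st.1, st.2 ++ [p.1])) ([], [])

-- B's join: each segment followed by the slot's base-36 digit of i, then the tail
def pvAsm (i : Nat) (segs : List (List Char)) (last : List Char) : List Char :=
  (segs.zipIdx.flatMap (fun p => p.1 ++ [pvReplacement.getD (i / 36 ^ p.2 % 36) ' '])) ++ last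

-- B's `for i in range(36 ** w)` loop: i counts up, n counts the remaining trials
def pvLoopB (segs : List (List Char)) (last : List Char) (used : List String) : Nat → Nat → Option String
  | _, 0 => none
  | i, n + 1 =>
    let temp := String.mk (pvAsm i segs last)
    if temp ∉ used then some temp
    else pvLoopB segs last used (i + 1) n

def returnUniqueCode_alt (code : String) (wildcard_posn : List Int) (code_list : List String) : Option String :=
  let st := pvSegs code.toList wildcard_posn
  pvLoopB st.1 st.2 code_list 0 (36 ^ wildcard_posn.length)

-- ===== PRECONDITION & SPEC =====
def Spec_returnUniqueCode (code : String) (wildcard_posn : List Int) (code_list : List String) (out : Option String) : Prop := out = returnUniqueCode_alt code wildcard_posn code_list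
instance (code : String) (wildcard_posn : List Int) (code_list : List String) (out : Option String) : Decidable (Spec_returnUniqueCode code wildcard_posn code_list out) := by unfold Spec_returnUniqueCode; infer_instance

-- ===== CLAIM (what is proved, stated in full; the proofs are below) =====
def Claim_equal_returnUniqueCode : Prop := ∀ (code : String) (wildcard_posn : List Int) (code_list : List String), Dom_returnUniqueCode code wildcard_posn code_list → Spec_returnUniqueCode code wildcard_posn code_list (returnUniqueCode code wildcard_posn code_list)

-- ===== LEMMAS AND PROOFS =====

-- the little-endian base-36 digit vector A maintains in rep_posn is the digit
-- vector B reads off i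
def pvDigits (i w : Nat) : List Nat := (List.range w).map (fun r => i / 36 ^ r % 36)

theorem pvDigits_getD (i w r : Nat) (h : i < 36 ^ w) :
    (pvDigits i w).getD r 0 = i / 36 ^ r % 36 := by
  by_cases hr : r < w
  · simp [pvDigits, List.getD, hr]
  · have hle : 36 ^ w ≤ 36 ^ r := Nat.pow_le_pow_right (by norm_num) (by omega)
    have : i / 36 ^ r = 0 := Nat.div_eq_of_lt (by omega)
    simp [pvDigits, List.getD, hr, this]

theorem pvDigits_zero (w : Nat) : pvDigits 0 w = List.replicate w 0 := by
  simp [pvDigits]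

theorem pvDigits_succ (i w : Nat) :
    pvDigits i (w + 1) = (i % 36) :: pvDigits (i / 36) w := by
  unfold pvDigits
  rw [List.range_succ_eq_map]
  simp [List.map_map, Function.comp_def, pow_succ, Nat.div_div_eq_div_mul, Nat.mul_comm]

-- common specification of one trial's code: walk the suffix of the code, filling
-- wildcard positions with base-36 digits of i
def pvSpecB (wp : List Int) (i : Nat) : List Char → Nat → Nat → List Char
  | [], _, _ => []
  | c :: cs, start, r =>
    if ((start : Int) ∈ wp) then
      pvReplacement.getD (i / 36 ^ r % 36) ' ' :: pvSpecB wp i cs (start + 1) (r + 1)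
    else c :: pvSpecB wp i cs (start + 1) r

-- number of wildcard positions along the suffix
def pvCnt (wp : List Int) : List Char → Nat → Nat
  | [], _ => 0
  | _ :: cs, start => (if ((start : Int) ∈ wp) then 1 else 0) + pvCnt wp cs (start + 1)

-- A's per-trial fold equals the spec walk
theorem pvBuildA_spec (codeL : List Char) (wp : List Int) (i w : Nat) (hi : i < 36 ^ w) :
    ∀ (cs : List Char) (start : Nat), codeL.drop start = cs →
    ∀ (acc : List Char) (r : Nat),
      (List.range' start cs.length).foldl (fun (acc : List Char × Nat) (posn : Nat) =>
        if ((posn : Int) ∈ wp) then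
          (acc.1 ++ [pvReplacement.getD ((pvDigits i w).getD acc.2 0) ' '], acc.2 + 1)
        else
          (acc.1 ++ [codeL.getD posn ' '], acc.2)) (acc, r)
      = (acc ++ pvSpecB wp i cs start r, r + pvCnt wp cs start) := by
  intro cs
  induction cs with
  | nil => intro start _ acc r; simp [pvSpecB, pvCnt]
  | cons c cs ih =>
    intro start hdrop acc r
    have h0 : codeL[start]? = some c := by
      have h0' : (codeL.drop start)[0]? = some c := by rw [hdrop]; rfl
      rw [List.getElem?_drop] at h0'
      simpa using h0'
    have hdrop' : codeL.drop (start + 1) = cs := by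
      have h1 := congrArg (List.drop 1) hdrop
      simpa [List.drop_drop, Nat.add_comm] using h1
    rw [List.length_cons, List.range'_succ, List.foldl_cons]
    by_cases hw : ((start : Int) ∈ wp)
    · rw [if_pos hw]
      simp only []
      rw [pvDigits_getD i w r hi]
      rw [ih (start + 1) hdrop' (acc ++ [pvReplacement.getD (i / 36 ^ r % 36) ' ']) (r + 1)]
      simp [pvSpecB, hw, pvCnt]
      try omega
    · rw [if_neg hw]
      simp only []
      rw [ih (start + 1) hdrop' (acc ++ [codeL.getD start ' ']) r]
      simp [pvSpecB, hw, pvCnt, List.getD, h0]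

-- recursive characterisation of B's segment scan
def pvF (wp : List Int) : List Char → Nat → List Char → List (List Char)
  | [], _, _ => []
  | c :: cs, start, cur =>
    if ((start : Int) ∈ wp) then cur :: pvF wp cs (start + 1) []
    else pvF wp cs (start + 1) (cur ++ [c])

def pvG (wp : List Int) : List Char → Nat → List Char → List Char
  | [], _, cur => cur
  | c :: cs, start, cur =>
    if ((start : Int) ∈ wp) then pvG wp cs (start + 1) []
    else pvG wp cs (start + 1) (cur ++ [c])

theorem pvSegs_state (wp : List Int) :
    ∀ (cs : List Char) (start : Nat) (segs : List (List Char)) (cur : List Char),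
      (cs.zipIdx start).foldl (fun (st : List (List Char) × List Char) (p : Char × Nat) =>
        if ((p.2 : Int) ∈ wp) then (st.1 ++ [st.2], [])
        else (st.1, st.2 ++ [p.1])) (segs, cur)
      = (segs ++ pvF wp cs start cur, pvG wp cs start cur) := by
  intro cs
  induction cs with
  | nil => intro start segs cur; simp [pvF, pvG]
  | cons c cs ih =>
    intro start segs cur
    rw [List.zipIdx_cons, List.foldl_cons]
    by_cases hw : ((start : Int) ∈ wp)
    · simp only [hw, if_pos]
      rw [ih (start + 1) (segs ++ [cur]) []]
      simp [pvF, pvG, hw]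
    · simp only [hw, if_neg, not_false_iff]
      rw [ih (start + 1) segs (cur ++ [c])]
      simp [pvF, pvG, hw]

-- recursive form of B's join, with the digit index made explicit
def pvAsmFrom (i : Nat) : List (List Char) → Nat → List Char
  | [], _ => []
  | s :: segs, r => s ++ pvReplacement.getD (i / 36 ^ r % 36) ' ' :: pvAsmFrom i segs (r + 1)

theorem pvAsm_from (i : Nat) :
    ∀ (segs : List (List Char)) (r : Nat),
      (segs.zipIdx r).flatMap (fun p => p.1 ++ [pvReplacement.getD (i / 36 ^ p.2 % 36) ' '])
      = pvAsmFrom i segs r := by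
  intro segs
  induction segs with
  | nil => intro r; rfl
  | cons s segs ih =>
    intro r
    rw [List.zipIdx_cons, List.flatMap_cons, ih (r + 1)]
    simp [pvAsmFrom]

-- joining the scanned segments with digits gives the spec walk
theorem pvAsmFrom_spec (wp : List Int) (i : Nat) :
    ∀ (cs : List Char) (start : Nat) (cur : List Char) (r : Nat),
      pvAsmFrom i (pvF wp cs start cur) r ++ pvG wp cs start cur
      = cur ++ pvSpecB wp i cs start r := by
  intro cs
  induction cs with
  | nil => intro start cur r; simp [pvF, pvG, pvAsmFrom, pvSpecB]
  | cons c cs ih =>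
    intro start cur r
    by_cases hw : ((start : Int) ∈ wp)
    · simp only [pvF, pvG, pvSpecB, hw, if_pos, pvAsmFrom]
      rw [List.append_assoc, List.cons_append, ih (start + 1) [] (r + 1)]
      simp
    · simp only [pvF, pvG, pvSpecB, hw, if_neg, not_false_iff]
      rw [ih (start + 1) (cur ++ [c]) r]
      simp

-- per-trial equality: A's built code equals B's assembled code
theorem pvBuild_eq (codeL : List Char) (wp : List Int) (i w : Nat) (hi : i < 36 ^ w) :
    (pvBuildA codeL wp (pvDigits i w)).1
      = pvAsm i (pvSegs codeL wp).1 (pvSegs codeL wp).2 := by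
  have hA := pvBuildA_spec codeL wp i w hi codeL 0 (by simp) [] 0
  have hS := pvSegs_state wp codeL 0 [] []
  unfold pvBuildA pvSegs pvAsm
  rw [List.range_eq_range', hA]
  rw [hS]
  simp only [List.nil_append]
  rw [pvAsm_from i (pvF wp codeL 0 []) 0, pvAsmFrom_spec wp i codeL 0 [] 0]
  simp

theorem pvOdo_digits (w : Nat) : ∀ i : Nat, i < 36 ^ w →
    pvOdo (pvDigits i w) = if i + 1 < 36 ^ w then some (pvDigits (i + 1) w) else none := by
  induction w with
  | zero =>
    intro i hi
    interval_cases i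
    simp [pvDigits, pvOdo]
  | succ w ih =>
    intro i hi
    have e1 := Nat.div_add_mod i 36
    have e2 := Nat.div_add_mod (i + 1) 36
    have m1 : i % 36 < 36 := Nat.mod_lt _ (by norm_num)
    have m2 : (i + 1) % 36 < 36 := Nat.mod_lt _ (by norm_num)
    have hp : (36 : Nat) ^ (w + 1) = 36 ^ w * 36 := pow_succ 36 w
    have hd : i / 36 < 36 ^ w := by
      apply Nat.div_lt_of_lt_mul; omega
    rw [pvDigits_succ]
    by_cases h35 : i % 36 = 35
    · have f1 : (i + 1) % 36 = 0 := by omega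
      have f2 : (i + 1) / 36 = i / 36 + 1 := by omega
      rw [pvOdo, if_pos h35, ih (i / 36) hd]
      by_cases hlt : i / 36 + 1 < 36 ^ w
      · have : i + 1 < 36 ^ (w + 1) := by omega
        rw [if_pos hlt, if_pos this, pvDigits_succ, f1, f2]
        rfl
      · have : ¬ (i + 1 < 36 ^ (w + 1)) := by omega
        rw [if_neg hlt, if_neg this]
        rfl
    · have f1 : (i + 1) % 36 = i % 36 + 1 := by omega
      have f2 : (i + 1) / 36 = i / 36 := by omega
      have : i + 1 < 36 ^ (w + 1) := by omega
      rw [pvOdo, if_neg h35, if_pos this, pvDigits_succ, f1, f2]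

theorem pvLoop_eq (codeL : List Char) (wp : List Int) (cl : List String) (w : Nat) :
    ∀ fuel i : Nat, i + fuel = 36 ^ w →
      pvLoopA codeL wp cl (pvDigits i w) fuel
        = pvLoopB (pvSegs codeL wp).1 (pvSegs codeL wp).2 cl i fuel := by
  intro fuel
  induction fuel with
  | zero => intro i _; rfl
  | succ n ih =>
    intro i h
    have hi : i < 36 ^ w := by omega
    rw [pvLoopA, pvLoopB]
    simp only [pvBuild_eq codeL wp i w hi]
    by_cases hm : String.mk (pvAsm i (pvSegs codeL wp).1 (pvSegs codeL wp).2) ∉ cl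
    · rw [if_pos hm, if_pos hm]
    · rw [if_neg hm, if_neg hm, pvOdo_digits w i hi]
      by_cases hlt : i + 1 < 36 ^ w
      · rw [if_pos hlt]
        exact ih (i + 1) (by omega)
      · rw [if_neg hlt]
        have hn : n = 0 := by omega
        subst hn
        rfl

-- ===== VERDICT (by name: the statement is the Claim_ definition above) =====
theorem returnUniqueCode_spec : Claim_equal_returnUniqueCode := by
  intro code wp cl _
  unfold Spec_returnUniqueCode returnUniqueCode returnUniqueCode_alt
  rw [← pvDigits_zero]
  exact pvLoop_eq code.toList wp cl wp.length (36 ^ wp.length) 0 (by omega)
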